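-- pv_equiv track=rewrite | github.com/dlstjd92/Algorithm_storage | 프로그래머스/3/388354. 홀짝트리/홀짝트리.py | solution
-- ===== SOURCE A (Python) =====
-- from collections import deque
--
-- def solution(nodes, edges):
--     n = len(nodes)
--     # 1) 노드 값을 0..n-1로 매핑
--     id_map = {v: i for i, v in enumerate(nodes)}
--
--     # 2) degree 계산 및 인접 리스트 구성
--     deg = [0] * n
--     adj = [[] for _ in range(n)]
--     for a, b in edges:
--         u, v = id_map[a], id_map[b]
--         adj[u].append(v)
--         adj[v].append(u)
--         deg[u] += 1
--         deg[v] += 1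
--
--     visited = [False] * n
--     odd_even_cnt = 0
--     inv_odd_even_cnt = 0
--
--     # 3) 컴포넌트별 BFS
--     for i in range(n):
--         if visited[i]:
--             continue
--         queue = deque([i])
--         visited[i] = True
--
--         cnt1 = 0  # 홀짝 트리 조건: deg%2 == node%2 인 정점의 수
--         cnt2 = 0  # 역홀짝 트리 조건: deg%2 != node%2 인 정점의 수
--
--         while queue:
--             u = queue.popleft()
--             g = deg[u] & 1          # deg(u) mod 2
--             v_parity = nodes[u] & 1 # u mod 2
--
--             if g == v_parity:
--                 cnt1 += 1
--             else:
--                 cnt2 += 1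
--
--             for w in adj[u]:
--                 if not visited[w]:
--                     visited[w] = True
--                     queue.append(w)
--
--         # 4) 컴포넌트 단위 결과 집계
--         if cnt1 == 1:
--             odd_even_cnt += 1
--         if cnt2 == 1:
--             inv_odd_even_cnt += 1
--
--     return [odd_even_cnt, inv_odd_even_cnt]
-- ===== SOURCE B (Python) =====
-- def solution(nodes, edges):
--     n = len(nodes)
--     id_map = {v: i for i, v in enumerate(nodes)}
--
--     # one pass over edges: degrees + component labels by eager label merging
--     deg = [0] * n
--     comp = list(range(n))
--     for a, b in edges:
--         u, v = id_map[a], id_map[b]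
--         deg[u] += 1
--         deg[v] += 1
--         ru, rv = comp[u], comp[v]
--         if ru != rv:
--             comp = [ru if c == rv else c for c in comp]
--
--     # tally per component label
--     cnt1 = {}
--     cnt2 = {}
--     for i in range(n):
--         r = comp[i]
--         same = (deg[i] & 1) == (nodes[i] & 1)
--         cnt1[r] = cnt1.get(r, 0) + (1 if same else 0)
--         cnt2[r] = cnt2.get(r, 0) + (0 if same else 1)
--
--     return [sum(1 for v in cnt1.values() if v == 1),
--             sum(1 for v in cnt2.values() if v == 1)]
-- ===== Notes on version B (the rewrite author's own statement) =====
-- stated objective: alternative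
-- what changed: Replaces BFS over an adjacency list with visited flags by a single pass over edges that merges component labels (union-find with eager relabelling) plus one dict-tally pass over all node indices keyed by component label.
import Mathlib
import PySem

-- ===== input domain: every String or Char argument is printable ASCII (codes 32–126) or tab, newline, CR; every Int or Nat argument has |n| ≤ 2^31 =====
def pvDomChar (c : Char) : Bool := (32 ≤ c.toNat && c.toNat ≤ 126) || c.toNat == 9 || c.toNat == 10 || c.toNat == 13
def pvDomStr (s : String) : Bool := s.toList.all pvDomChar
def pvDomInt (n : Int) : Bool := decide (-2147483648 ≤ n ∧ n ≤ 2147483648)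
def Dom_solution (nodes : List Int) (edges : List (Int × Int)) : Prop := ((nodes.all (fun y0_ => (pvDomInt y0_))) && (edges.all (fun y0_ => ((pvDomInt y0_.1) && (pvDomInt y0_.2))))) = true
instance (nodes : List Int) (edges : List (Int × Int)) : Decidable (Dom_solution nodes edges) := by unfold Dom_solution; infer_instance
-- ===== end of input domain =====

-- B replaces A's adjacency-list BFS with one edge pass merging component labels plus a dict tally; same return value (objective: alternative, not faster).

-- ===== PORT A =====
-- id_map = {v: i for i, v in enumerate(nodes)}  (shared line of both Pythons)
def mkIdMap (nodes : List Int) : PySem.Dict Int Int :=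
  (PySem.List.enumerate nodes 0).foldl (fun d p => d.insert p.2 p.1) PySem.Dict.empty

-- u, v = id_map[a], id_map[b]  (enumerate indices are ≥ 0 so .toNat is exact; a
-- missing key is Python's KeyError, excluded by Pre_solution, the .getD 0 there is never relied on)
def edgeIdx (idMap : PySem.Dict Int Int) (e : Int × Int) : Nat × Nat :=
  (((idMap.get? e.1).getD 0).toNat, ((idMap.get? e.2).getD 0).toNat)

-- deg[u] += 1; deg[v] += 1  (shared line of both Pythons)
def degStep (idMap : PySem.Dict Int Int) (d : List Int) (e : Int × Int) : List Int :=
  let uv := edgeIdx idMap e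
  let d1 := d.set uv.1 (d.getD uv.1 0 + 1)
  d1.set uv.2 (d1.getD uv.2 0 + 1)

-- adj[u].append(v); adj[v].append(u)
def adjStep (idMap : PySem.Dict Int Int) (adj : List (List Nat)) (e : Int × Int) : List (List Nat) :=
  let uv := edgeIdx idMap e
  let a1 := adj.set uv.1 (adj.getD uv.1 [] ++ [uv.2])
  a1.set uv.2 (a1.getD uv.2 [] ++ [uv.1])

def countFalse (vis : List Bool) : Nat := vis.countP (fun b => !b)

-- inner 'for w in adj[u]: if not visited[w]: visited[w]=True; queue.append(w)'
-- (getD default true: an out-of-range w never occurs in Python; treating it as visited keeps the port total)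
def pushNbrs (vis : List Bool) (q : List Nat) (nbrs : List Nat) : List Bool × List Nat :=
  nbrs.foldl (fun s w => if s.1.getD w true then s else (s.1.set w true, s.2 ++ [w])) (vis, q)

lemma countFalse_set_true (vis : List Bool) (w : Nat) (h : vis.getD w true = false) :
    countFalse (vis.set w true) + 1 = countFalse vis := by
  induction vis generalizing w with
  | nil => simp [List.getD] at h
  | cons b t ih =>
    cases w with
    | zero =>
      simp [List.getD] at h
      simp [h, countFalse]
    | succ w =>
      have h' : t.getD w true = false := by simpa [List.getD] using h
      have := ih w h'
      simp only [List.set_cons_succ, countFalse, List.countP_cons] at *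
      omega

lemma pushNbrs_cons (vis : List Bool) (q : List Nat) (w : Nat) (t : List Nat) :
    pushNbrs vis q (w :: t) =
      if vis.getD w true then pushNbrs vis q t
      else pushNbrs (vis.set w true) (q ++ [w]) t := by
  simp only [pushNbrs, List.foldl_cons]
  by_cases h : vis.getD w true = true
  · rw [if_pos h, if_pos h]
  · rw [if_neg h, if_neg h]

lemma pushNbrs_measure (vis : List Bool) (q : List Nat) (nbrs : List Nat) :
    2 * countFalse (pushNbrs vis q nbrs).1 + (pushNbrs vis q nbrs).2.length ≤
      2 * countFalse vis + q.length := by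
  induction nbrs generalizing vis q with
  | nil => simp [pushNbrs]
  | cons w t ih =>
    rw [pushNbrs_cons]
    by_cases h : vis.getD w true = true
    · rw [if_pos h]; exact ih vis q
    · rw [if_neg h]
      have h1 := ih (vis.set w true) (q ++ [w])
      have h2 := countFalse_set_true vis w (by simpa using h)
      simp only [List.length_append, List.length_cons, List.length_nil] at h1 ⊢
      omega

-- the 'while queue:' loop (counts the popped node, then pushes unvisited neighbours;
-- 'deg[u] & 1' / 'nodes[u] & 1' ported with PySem.Int.band)
def solBFS (adj : List (List Nat)) (deg nodes : List Int) :
    List Nat → List Bool → Int → Int → List Bool × Int × Int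
  | [], vis, c1, c2 => (vis, c1, c2)
  | u :: q, vis, c1, c2 =>
    let g := PySem.Int.band (deg.getD u 0) 1
    let p := PySem.Int.band (nodes.getD u 0) 1
    let s := pushNbrs vis q (adj.getD u [])
    if g = p then solBFS adj deg nodes s.2 s.1 (c1 + 1) c2
    else solBFS adj deg nodes s.2 s.1 c1 (c2 + 1)
termination_by q vis _ _ => 2 * countFalse vis + q.length
decreasing_by
  · have h := pushNbrs_measure vis q (adj.getD u [])
    simp only [List.length_cons]; omega
  · have h := pushNbrs_measure vis q (adj.getD u [])
    simp only [List.length_cons]; omega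

-- 'for i in range(n): if visited[i]: continue; …BFS…; if cnt1 == 1: …'
def bfsOuter (adj : List (List Nat)) (deg nodes : List Int) (n : Nat) : List Bool × Int × Int :=
  (List.range n).foldl
    (fun st i =>
      if st.1.getD i false then st
      else
        let r := solBFS adj deg nodes [i] (st.1.set i true) 0 0
        (r.1, st.2.1 + (if r.2.1 = 1 then 1 else 0), st.2.2 + (if r.2.2 = 1 then 1 else 0)))
    (List.replicate n false, 0, 0)

def solution (nodes : List Int) (edges : List (Int × Int)) : List Int :=
  let n := nodes.length
  let idMap := mkIdMap nodes
  let da := edges.foldl (fun st e => (degStep idMap st.1 e, adjStep idMap st.2 e))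
    (List.replicate n (0 : Int), List.replicate n ([] : List Nat))
  let fin := bfsOuter da.2 da.1 nodes n
  [fin.2.1, fin.2.2]

-- ===== PORT B =====
-- 'ru, rv = comp[u], comp[v]; if ru != rv: comp = [ru if c == rv else c for c in comp]'
def compStep (idMap : PySem.Dict Int Int) (c : List Nat) (e : Int × Int) : List Nat :=
  let uv := edgeIdx idMap e
  let ru := c.getD uv.1 0
  let rv := c.getD uv.2 0
  if ru ≠ rv then c.map (fun x => if x = rv then ru else x) else c

-- 'cnt[r] = cnt.get(r, 0) + bit'
def tallyStep (root : Nat → Nat) (bit : Nat → Int) (d : PySem.Dict Nat Int) (i : Nat) : PySem.Dict Nat Int :=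
  d.insert (root i) (d.getD (root i) 0 + bit i)

-- 'sum(1 for v in cnt.values() if v == 1)'
def countOnes (vals : List Int) : Int := vals.foldl (fun acc v => if v = 1 then acc + 1 else acc) 0

def solution_alt (nodes : List Int) (edges : List (Int × Int)) : List Int :=
  let n := nodes.length
  let idMap := mkIdMap nodes
  let dc := edges.foldl (fun st e => (degStep idMap st.1 e, compStep idMap st.2 e))
    (List.replicate n (0 : Int), List.range n)
  let deg := dc.1
  let comp := dc.2
  let root := fun i => comp.getD i 0
  let same := fun i => PySem.Int.band (deg.getD i 0) 1 = PySem.Int.band (nodes.getD i 0) 1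
  let tal := (List.range n).foldl
    (fun (st : PySem.Dict Nat Int × PySem.Dict Nat Int) i =>
      (tallyStep root (fun i => if same i then 1 else 0) st.1 i,
       tallyStep root (fun i => if same i then 0 else 1) st.2 i))
    (PySem.Dict.empty, PySem.Dict.empty)
  [countOnes tal.1.values, countOnes tal.2.values]

-- ===== PRECONDITION & SPEC =====
-- Pre_ excludes exactly the inputs where an edge endpoint is not a node value: there
-- Python A (and Python B) raise KeyError on id_map[...].
def Pre_solution (nodes : List Int) (edges : List (Int × Int)) : Prop :=
  ∀ p ∈ edges, p.1 ∈ nodes ∧ p.2 ∈ nodes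
instance (nodes : List Int) (edges : List (Int × Int)) : Decidable (Pre_solution nodes edges) := by
  unfold Pre_solution; infer_instance

def pvWitness_solution : List Int × (List (Int × Int)) := ([1, 2, 4], [(1, 2)])

def Spec_solution (nodes : List Int) (edges : List (Int × Int)) (out : List Int) : Prop := out = solution_alt nodes edges
instance (nodes : List Int) (edges : List (Int × Int)) (out : List Int) : Decidable (Spec_solution nodes edges out) := by unfold Spec_solution; infer_instance

-- ===== CLAIM (what is proved, stated in full; the proofs are below) =====
def Claim_equal_solution : Prop := ∀ (nodes : List Int) (edges : List (Int × Int)), Dom_solution nodes edges → Pre_solution nodes edges → Spec_solution nodes edges (solution nodes edges)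

-- ===== LEMMAS AND PROOFS =====

-- the single-edge relation (index pairs) and its reflexive-transitive closure: connectivity
def stepRel (E : List (Nat × Nat)) (x y : Nat) : Prop := (x, y) ∈ E ∨ (y, x) ∈ E

def connR (E : List (Nat × Nat)) : Nat → Nat → Prop := Relation.ReflTransGen (stepRel E)

lemma stepRel_symm {E : List (Nat × Nat)} {x y : Nat} (h : stepRel E x y) : stepRel E y x := h.symm

lemma connR_symm {E : List (Nat × Nat)} {x y : Nat} (h : connR E x y) : connR E y x :=
  Relation.ReflTransGen.symmetric (fun _ _ h => stepRel_symm h) h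

lemma connR_nil {x y : Nat} : connR [] x y ↔ x = y := by
  constructor
  · intro h
    induction h with
    | refl => rfl
    | tail _ hs ih => simp [stepRel] at hs
  · rintro rfl; exact Relation.ReflTransGen.refl

lemma connR_mono {E F : List (Nat × Nat)} {x y : Nat} (h : connR E x y) : connR (E ++ F) x y := by
  induction h with
  | refl => exact Relation.ReflTransGen.refl
  | tail _ hs ih =>
    exact ih.tail (by rcases hs with h | h
                      · exact Or.inl (List.mem_append_left _ h)
                      · exact Or.inr (List.mem_append_left _ h))

lemma connR_append_one {E : List (Nat × Nat)} {u v x y : Nat} :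
    connR (E ++ [(u, v)]) x y ↔
      connR E x y ∨ (connR E x u ∧ connR E v y) ∨ (connR E x v ∧ connR E u y) := by
  constructor
  · intro h
    induction h with
    | refl => exact Or.inl Relation.ReflTransGen.refl
    | tail _ hs ih =>
      rename_i b c _
      have hstep : stepRel E b c ∨ (b = u ∧ c = v) ∨ (b = v ∧ c = u) := by
        rcases hs with h | h <;> simp only [List.mem_append, List.mem_singleton] at h
        · rcases h with h | h
          · exact Or.inl (Or.inl h)
          · rw [Prod.ext_iff] at h
            exact Or.inr (Or.inl h)
        · rcases h with h | h
          · exact Or.inl (Or.inr h)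
          · rw [Prod.ext_iff] at h
            exact Or.inr (Or.inr ⟨h.2, h.1⟩)
      rcases hstep with hs' | ⟨rfl, rfl⟩ | ⟨rfl, rfl⟩
      · rcases ih with h1 | ⟨h1, h2⟩ | ⟨h1, h2⟩
        · exact Or.inl (h1.tail hs')
        · exact Or.inr (Or.inl ⟨h1, h2.tail hs'⟩)
        · exact Or.inr (Or.inr ⟨h1, h2.tail hs'⟩)
      · rcases ih with h1 | ⟨h1, h2⟩ | ⟨h1, h2⟩
        · exact Or.inr (Or.inl ⟨h1, Relation.ReflTransGen.refl⟩)
        · exact Or.inr (Or.inl ⟨h1, Relation.ReflTransGen.refl⟩)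
        · exact Or.inl h1
      · rcases ih with h1 | ⟨h1, h2⟩ | ⟨h1, h2⟩
        · exact Or.inr (Or.inr ⟨h1, Relation.ReflTransGen.refl⟩)
        · exact Or.inl h1
        · exact Or.inr (Or.inr ⟨h1, Relation.ReflTransGen.refl⟩)
  · have hnew : connR (E ++ [(u, v)]) u v :=
      Relation.ReflTransGen.single (Or.inl (by simp))
    rintro (h | ⟨h1, h2⟩ | ⟨h1, h2⟩)
    · exact connR_mono h
    · exact (connR_mono h1).trans (hnew.trans (connR_mono h2))
    · exact (connR_mono h1).trans ((connR_symm hnew).trans (connR_mono h2))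

lemma mkIdMap_lt (nodes : List Int) (a : Int) (h : a ∈ nodes) :
    ∃ k : Nat, (mkIdMap nodes).get? a = some (k : Int) ∧ k < nodes.length := by
  induction nodes using List.reverseRecOn with
  | nil => simp at h
  | append_singleton xs x ih =>
    have hunf : mkIdMap (xs ++ [x]) = (mkIdMap xs).insert x ((0 : Int) + xs.length) := by
      simp [mkIdMap, PySem.List.enumerate_append]
    by_cases hax : a = x
    · subst hax
      refine ⟨xs.length, ?_, by simp⟩
      rw [hunf, PySem.Dict.get?_insert_self]
      simp
    · have ha : a ∈ xs := by
        rcases List.mem_append.mp h with h | h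
        · exact h
        · simp at h; exact absurd h hax
      obtain ⟨k, hk, hklt⟩ := ih ha
      refine ⟨k, ?_, by simp; omega⟩
      rw [hunf, PySem.Dict.get?_insert_of_ne _ _ hax, hk]

lemma edgeIdx_lt (nodes : List Int) (e : Int × Int) (h1 : e.1 ∈ nodes) (h2 : e.2 ∈ nodes) :
    (edgeIdx (mkIdMap nodes) e).1 < nodes.length ∧ (edgeIdx (mkIdMap nodes) e).2 < nodes.length := by
  obtain ⟨k1, hk1, hlt1⟩ := mkIdMap_lt nodes e.1 h1
  obtain ⟨k2, hk2, hlt2⟩ := mkIdMap_lt nodes e.2 h2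
  simp [edgeIdx, hk1, hk2, hlt1, hlt2]

-- general list-with-default facts used throughout
lemma getD_set_self {α : Type} (l : List α) (k : Nat) (x : α) (d : α) (h : k < l.length) :
    (l.set k x).getD k d = x := by
  simp [List.getD_eq_getElem?_getD, List.getElem?_set_self, h]

lemma getD_set_ne {α : Type} (l : List α) (k j : Nat) (x : α) (d : α) (h : j ≠ k) :
    (l.set k x).getD j d = l.getD j d := by
  simp [List.getD_eq_getElem?_getD, List.getElem?_set_ne (Ne.symm h)]

lemma getD_map_ite (l : List Nat) (i : Nat) (ru rv : Nat) (h : i < l.length) :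
    (l.map (fun x => if x = rv then ru else x)).getD i 0 =
      if l.getD i 0 = rv then ru else l.getD i 0 := by
  simp [List.getD_eq_getElem?_getD, List.getElem?_map, List.getElem?_eq_getElem h]

-- ===== B-side: the label-merging fold computes connectivity =====
lemma comp_inv (n : Nat) (idMap : PySem.Dict Int Int) :
    ∀ (es : List (Int × Int)) (comp : List Nat) (E0 : List (Nat × Nat)),
      (∀ e ∈ es, (edgeIdx idMap e).1 < n ∧ (edgeIdx idMap e).2 < n) →
      comp.length = n →
      (∀ i j, i < n → j < n → (comp.getD i 0 = comp.getD j 0 ↔ connR E0 i j)) →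
      (es.foldl (compStep idMap) comp).length = n ∧
        ∀ i j, i < n → j < n →
          ((es.foldl (compStep idMap) comp).getD i 0 = (es.foldl (compStep idMap) comp).getD j 0 ↔
            connR (E0 ++ es.map (edgeIdx idMap)) i j) := by
  intro es
  induction es with
  | nil => intro comp E0 _ hlen hinv; simpa using ⟨hlen, hinv⟩
  | cons e es ih =>
    intro comp E0 hb hlen hinv
    obtain ⟨hu, hv⟩ := hb e (by simp)
    set u := (edgeIdx idMap e).1 with hu_def
    set v := (edgeIdx idMap e).2 with hv_def
    have hstep_len : (compStep idMap comp e).length = n := by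
      unfold compStep
      dsimp only
      split <;> simp [hlen]
    have hstep_inv : ∀ i j, i < n → j < n →
        ((compStep idMap comp e).getD i 0 = (compStep idMap comp e).getD j 0 ↔
          connR (E0 ++ [(u, v)]) i j) := by
      intro i j hi hj
      rw [connR_append_one]
      unfold compStep
      dsimp only
      rw [← hu_def, ← hv_def]
      by_cases hr : comp.getD u 0 ≠ comp.getD v 0
      · rw [if_pos hr]
        rw [getD_map_ite _ _ _ _ (by omega), getD_map_ite _ _ _ _ (by omega)]
        rw [← hinv i j hi hj, ← hinv i u hi hu, ← hinv v j hv hj, ← hinv i v hi hv,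
          ← hinv u j hu hj]
        split_ifs <;> omega
      · rw [if_neg hr]
        rw [not_not] at hr
        rw [← hinv i j hi hj, ← hinv i u hi hu, ← hinv v j hv hj, ← hinv i v hi hv,
          ← hinv u j hu hj]
        omega
    have := ih (compStep idMap comp e) (E0 ++ [(u, v)]) (fun e' he' => hb e' (by simp [he']))
      hstep_len hstep_inv
    rw [List.append_assoc] at this
    simpa only [List.foldl_cons, List.map_cons, List.singleton_append] using this

-- ===== A-side: the adjacency fold records exactly the edges =====
lemma adj_inv (n : Nat) (idMap : PySem.Dict Int Int) :
    ∀ (es : List (Int × Int)) (adj : List (List Nat)) (E0 : List (Nat × Nat)),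
      (∀ e ∈ es, (edgeIdx idMap e).1 < n ∧ (edgeIdx idMap e).2 < n) →
      adj.length = n →
      (∀ p ∈ E0, p.1 < n ∧ p.2 < n) →
      (∀ u w : Nat, w ∈ adj.getD u [] ↔ ((u, w) ∈ E0 ∨ (w, u) ∈ E0)) →
      (es.foldl (adjStep idMap) adj).length = n ∧
        ∀ u w : Nat, w ∈ (es.foldl (adjStep idMap) adj).getD u [] ↔
          ((u, w) ∈ E0 ++ es.map (edgeIdx idMap) ∨ (w, u) ∈ E0 ++ es.map (edgeIdx idMap)) := by
  intro es
  induction es with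
  | nil => intro adj E0 _ hlen _ hmem; simpa using ⟨hlen, hmem⟩
  | cons e es ih =>
    intro adj E0 hb hlen hE0 hmem
    obtain ⟨hu, hv⟩ := hb e (by simp)
    set u := (edgeIdx idMap e).1 with hu_def
    set v := (edgeIdx idMap e).2 with hv_def
    have hstep_len : (adjStep idMap adj e).length = n := by
      unfold adjStep; simp [hlen]
    have hstep_mem : ∀ x w : Nat, w ∈ (adjStep idMap adj e).getD x [] ↔
        ((x, w) ∈ E0 ++ [(u, v)] ∨ (w, x) ∈ E0 ++ [(u, v)]) := by
      intro x w
      unfold adjStep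
      dsimp only
      rw [← hu_def, ← hv_def]
      by_cases hxv : x = v
      · subst hxv
        rw [getD_set_self _ _ _ _ (by simp only [List.length_set, hlen]; omega)]
        by_cases hvu : v = u
        · rw [hvu, getD_set_self _ _ _ _ (by simp only [List.length_set, hlen]; omega)]
          simp only [List.mem_append, List.mem_singleton, hmem, Prod.ext_iff, hvu,
            eq_self_iff_true, and_true, true_and]
          tauto
        · rw [getD_set_ne _ _ _ _ _ hvu]
          simp only [List.mem_append, List.mem_singleton, hmem, Prod.ext_iff,
            eq_self_iff_true, and_true, true_and]
          tauto
      · rw [getD_set_ne _ _ _ _ _ hxv]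
        by_cases hxu : x = u
        · subst hxu
          rw [getD_set_self _ _ _ _ (by simp only [List.length_set, hlen]; omega)]
          simp only [List.mem_append, List.mem_singleton, hmem, Prod.ext_iff,
            eq_self_iff_true, and_true, true_and]
          tauto
        · rw [getD_set_ne _ _ _ _ _ hxu]
          simp only [List.mem_append, List.mem_singleton, hmem, Prod.ext_iff,
            eq_self_iff_true, and_true, true_and]
          tauto
    have hE0' : ∀ p ∈ E0 ++ [(u, v)], p.1 < n ∧ p.2 < n := by
      intro p hp
      rcases List.mem_append.mp hp with hp | hp
      · exact hE0 p hp
      · simp at hp; subst hp; exact ⟨hu, hv⟩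
    have := ih (adjStep idMap adj e) (E0 ++ [(u, v)]) (fun e' he' => hb e' (by simp [he']))
      hstep_len hE0' hstep_mem
    rw [List.append_assoc] at this
    simpa only [List.foldl_cons, List.map_cons, List.singleton_append] using this

-- ===== A-side: BFS machinery =====
def visTrue (vis : List Bool) (j : Nat) : Prop := vis.getD j false = true

lemma visTrue_lt {n : Nat} {vis : List Bool} {j : Nat} (hlen : vis.length = n)
    (h : visTrue vis j) : j < n := by
  by_contra hj
  rw [visTrue, List.getD_eq_default] at h
  · exact Bool.false_ne_true h
  · omega

lemma getD_true_eq_false (vis : List Bool) (w : Nat) (h : w < vis.length) :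
    vis.getD w true = vis.getD w false := by
  simp [List.getD_eq_getElem?_getD, List.getElem?_eq_getElem h]

lemma visTrue_set {vis : List Bool} {w : Nat} (hw : w < vis.length) (j : Nat) :
    visTrue (vis.set w true) j ↔ visTrue vis j ∨ j = w := by
  by_cases hj : j = w
  · subst hj
    unfold visTrue
    rw [getD_set_self vis j true false hw]
    simp
  · unfold visTrue
    rw [getD_set_ne vis w j true false hj]
    simp [hj]

lemma pushNbrs_spec (n : Nat) :
    ∀ (nbrs : List Nat) (vis : List Bool) (q : List Nat),
      vis.length = n → (∀ w ∈ nbrs, w < n) → (∀ x ∈ q, visTrue vis x) → q.Nodup →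
      (pushNbrs vis q nbrs).1.length = n ∧
      (∀ j, visTrue (pushNbrs vis q nbrs).1 j ↔ visTrue vis j ∨ j ∈ nbrs) ∧
      (∀ j, j ∈ (pushNbrs vis q nbrs).2 ↔ j ∈ q ∨ (j ∈ nbrs ∧ ¬ visTrue vis j)) ∧
      (pushNbrs vis q nbrs).2.Nodup ∧
      (∀ x ∈ (pushNbrs vis q nbrs).2, visTrue (pushNbrs vis q nbrs).1 x) := by
  intro nbrs
  induction nbrs with
  | nil =>
    intro vis q hlen _ hq hnd
    refine ⟨hlen, ?_, ?_, hnd, ?_⟩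
    · intro j; simp [pushNbrs]
    · intro j; simp [pushNbrs]
    · intro x hx
      simp only [pushNbrs, List.foldl_nil] at hx ⊢
      exact hq x hx
  | cons w t ih =>
    intro vis q hlen hnb hq hnd
    have hw : w < n := hnb w (by simp)
    rw [pushNbrs_cons]
    by_cases h : vis.getD w true = true
    · rw [if_pos h]
      have hvw : visTrue vis w := by rwa [visTrue, ← getD_true_eq_false vis w (by omega)]
      obtain ⟨l1, l2, l3, l4, l5⟩ := ih vis q hlen (fun x hx => hnb x (by simp [hx])) hq hnd
      refine ⟨l1, ?_, ?_, l4, l5⟩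
      · intro j
        rw [l2 j]
        simp only [List.mem_cons]
        by_cases hj : j = w
        · subst hj; tauto
        · tauto
      · intro j
        rw [l3 j]
        simp only [List.mem_cons]
        by_cases hj : j = w
        · subst hj; tauto
        · tauto
    · rw [if_neg h]
      have hnvw : ¬ visTrue vis w := by
        rw [visTrue, ← getD_true_eq_false vis w (by omega)]
        simpa using h
      have hwq : w ∉ q := fun hwq => hnvw (hq w hwq)
      have hlen' : (vis.set w true).length = n := by simp [hlen]
      have hq' : ∀ x ∈ q ++ [w], visTrue (vis.set w true) x := by
        intro x hx
        rcases List.mem_append.mp hx with hx | hx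
        · exact (visTrue_set (by omega) x).mpr (Or.inl (hq x hx))
        · simp at hx; subst hx
          exact (visTrue_set (by omega) x).mpr (Or.inr rfl)
      have hnd' : (q ++ [w]).Nodup := by
        simp only [List.nodup_append, List.nodup_singleton, true_and]
        refine ⟨hnd, fun a ha b hb => ?_⟩
        rcases List.mem_singleton.mp hb with rfl
        exact fun hab => hwq (hab ▸ ha)
      obtain ⟨l1, l2, l3, l4, l5⟩ := ih (vis.set w true) (q ++ [w]) hlen'
        (fun x hx => hnb x (by simp [hx])) hq' hnd'
      refine ⟨l1, ?_, ?_, l4, l5⟩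
      · intro j
        rw [l2 j, visTrue_set (by omega) j]
        simp only [List.mem_cons]
        tauto
      · intro j
        rw [l3 j, visTrue_set (by omega) j]
        simp only [List.mem_append, List.mem_singleton, List.mem_cons]
        by_cases hj : j = w
        · subst hj
          simp [hwq, hnvw]
        · tauto

lemma path_escape {E : List (Nat × Nat)} (vis : List Bool) (q : List Nat)
    (hcl : ∀ u, visTrue vis u → u ∉ q → ∀ w, stepRel E u w → visTrue vis w) :
    ∀ {x j : Nat}, connR E x j → visTrue vis x → visTrue vis j ∨ ∃ y ∈ q, connR E y j := by
  intro x j h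
  induction h using Relation.ReflTransGen.head_induction_on with
  | refl => intro hx; exact Or.inl hx
  | @head a c hstep hrest ih =>
    intro hx
    by_cases ha : a ∈ q
    · exact Or.inr ⟨a, ha, Relation.ReflTransGen.head hstep hrest⟩
    · exact ih (hcl a hx ha c hstep)

lemma countP_range_split (n u : Nat) (p q : Nat → Bool) (hu : u < n) (hpu : p u = true)
    (hqu : q u = false) (h : ∀ j, j ≠ u → p j = q j) :
    (List.range n).countP p = (List.range n).countP q + 1 := by
  induction n with
  | zero => omega
  | succ n ih =>
    rw [List.range_succ, List.countP_append, List.countP_append]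
    by_cases hun : u = n
    · subst hun
      have : (List.range u).countP p = (List.range u).countP q :=
        List.countP_congr (fun j hj => by rw [h j (by simp at hj; omega)])
      simp [this, List.countP_cons, hpu, hqu]
    · have := ih (by omega)
      have hn : p n = q n := h n (fun hc => hun hc.symm)
      simp only [List.countP_cons, List.countP_nil, hn]
      omega

-- the set of indices the BFS loop will still pop from state (q, vis)
def fpopP (E : List (Nat × Nat)) (q : List Nat) (vis : List Bool) (j : Nat) : Prop :=
  j ∈ q ∨ (¬ visTrue vis j ∧ ∃ y ∈ q, connR E y j)

def mtchB (deg nodes : List Int) (j : Nat) : Bool :=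
  decide (PySem.Int.band (deg.getD j 0) 1 = PySem.Int.band (nodes.getD j 0) 1)

lemma bfs_master (n : Nat) (E : List (Nat × Nat)) (adj : List (List Nat)) (deg nodes : List Int)
    (hE : ∀ p ∈ E, p.1 < n ∧ p.2 < n)
    (hadj : ∀ u w : Nat, w ∈ adj.getD u [] ↔ ((u, w) ∈ E ∨ (w, u) ∈ E)) :
    ∀ (m : Nat) (q : List Nat) (vis : List Bool) (c1 c2 : Int),
      2 * countFalse vis + q.length ≤ m →
      vis.length = n →
      (∀ x ∈ q, visTrue vis x) → q.Nodup →
      (∀ u, visTrue vis u → u ∉ q → ∀ w, stepRel E u w → visTrue vis w) →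
      (solBFS adj deg nodes q vis c1 c2).1.length = n ∧
      (∀ j, visTrue (solBFS adj deg nodes q vis c1 c2).1 j ↔
        visTrue vis j ∨ ∃ y ∈ q, connR E y j) ∧
      (solBFS adj deg nodes q vis c1 c2).2.1 =
        c1 + ((List.range n).countP (fun j =>
          @decide (fpopP E q vis j) (Classical.propDecidable _) && mtchB deg nodes j) : Int) ∧
      (solBFS adj deg nodes q vis c1 c2).2.2 =
        c2 + ((List.range n).countP (fun j =>
          @decide (fpopP E q vis j) (Classical.propDecidable _) && !mtchB deg nodes j) : Int) := by
  have hnilcount : ∀ (vis : List Bool) (b : Nat → Bool),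
      (List.range n).countP (fun j => @decide (fpopP E [] vis j) (Classical.propDecidable _) && b j) = 0 := by
    intro vis b
    rw [List.countP_eq_zero]
    intro j _
    have hnf : ¬ fpopP E [] vis j := by simp [fpopP]
    have hd : (@decide (fpopP E [] vis j) (Classical.propDecidable _)) = false :=
      @decide_eq_false _ (Classical.propDecidable _) hnf
    simp [hd]
  have hnilcase : ∀ (vis : List Bool) (c1 c2 : Int), vis.length = n →
      (solBFS adj deg nodes [] vis c1 c2).1.length = n ∧
      (∀ j, visTrue (solBFS adj deg nodes [] vis c1 c2).1 j ↔
        visTrue vis j ∨ ∃ y ∈ ([] : List Nat), connR E y j) ∧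
      (solBFS adj deg nodes [] vis c1 c2).2.1 =
        c1 + ((List.range n).countP (fun j =>
          @decide (fpopP E [] vis j) (Classical.propDecidable _) && mtchB deg nodes j) : Int) ∧
      (solBFS adj deg nodes [] vis c1 c2).2.2 =
        c2 + ((List.range n).countP (fun j =>
          @decide (fpopP E [] vis j) (Classical.propDecidable _) && !mtchB deg nodes j) : Int) := by
    intro vis c1 c2 hlen
    rw [solBFS]
    refine ⟨hlen, ?_, ?_, ?_⟩
    · intro j; simp
    · rw [hnilcount vis]
      simp
    · rw [hnilcount vis]
      simp
  intro m
  induction m with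
  | zero =>
    intro q vis c1 c2 hm hlen hq hnd hcl
    have hq0 : q = [] := by
      cases q with
      | nil => rfl
      | cons a t => exfalso; simp only [List.length_cons] at hm; omega
    subst hq0
    exact hnilcase vis c1 c2 hlen
  | succ m ih =>
    intro q vis c1 c2 hm hlen hq hnd hcl
    cases q with
    | nil => exact hnilcase vis c1 c2 hlen
    | cons u rest =>
      have hvu : visTrue vis u := hq u (by simp)
      have hun : u < n := visTrue_lt hlen hvu
      set nbrs := adj.getD u [] with hnbrs
      have hnb : ∀ w ∈ nbrs, w < n := by
        intro w hw
        rcases (hadj u w).mp hw with h | h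
        · exact (hE _ h).2
        · exact (hE _ h).1
      have hrest : ∀ x ∈ rest, visTrue vis x := fun x hx => hq x (by simp [hx])
      have hndr : rest.Nodup := (List.nodup_cons.mp hnd).2
      have hur : u ∉ rest := (List.nodup_cons.mp hnd).1
      obtain ⟨l1, l2, l3, l4, l5⟩ := pushNbrs_spec n nbrs vis rest hlen hnb hrest hndr
      set s := pushNbrs vis rest nbrs with hs
      have hus : u ∉ s.2 := by
        intro hc
        rcases (l3 u).mp hc with h | ⟨_, h⟩
        · exact hur h
        · exact h hvu
      have hvsu : visTrue s.1 u := (l2 u).mpr (Or.inl hvu)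
      have hcl' : ∀ x, visTrue s.1 x → x ∉ s.2 → ∀ w, stepRel E x w → visTrue s.1 w := by
        intro x hx hxs w hw
        by_cases hxu : x = u
        · subst hxu
          have hwn : w ∈ nbrs := (hadj x w).mpr hw
          exact (l2 w).mpr (Or.inr hwn)
        · by_cases hvx : visTrue vis x
          · by_cases hxr : x ∈ rest
            · exact absurd ((l3 x).mpr (Or.inl hxr)) hxs
            · have hxq : x ∉ u :: rest := by simp [hxu, hxr]
              exact (l2 w).mpr (Or.inl (hcl x hvx hxq w hw))
          · have hxn : x ∈ nbrs := by
              rcases (l2 x).mp hx with h | h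
              · exact absurd h hvx
              · exact h
            exact absurd ((l3 x).mpr (Or.inr ⟨hxn, hvx⟩)) hxs
      have hmeas : 2 * countFalse s.1 + s.2.length ≤ m := by
        have := pushNbrs_measure vis rest nbrs
        simp only [List.length_cons] at hm
        rw [hs]
        omega
      have hconn_u_nbrs : ∀ j ∈ nbrs, connR E u j :=
        fun j hj => Relation.ReflTransGen.single ((hadj u j).mp hj)
      have hescape : ∀ j, connR E u j → visTrue s.1 j ∨ ∃ y ∈ s.2, connR E y j :=
        fun j hc => path_escape s.1 s.2 hcl' hc hvsu
      have hvis_iff : ∀ j, (visTrue s.1 j ∨ ∃ y ∈ s.2, connR E y j) ↔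
          (visTrue vis j ∨ ∃ y ∈ u :: rest, connR E y j) := by
        intro j
        constructor
        · rintro (hsj | ⟨y, hy, hyj⟩)
          · rcases (l2 j).mp hsj with h | h
            · exact Or.inl h
            · exact Or.inr ⟨u, by simp, hconn_u_nbrs j h⟩
          · rcases (l3 y).mp hy with h | ⟨hyn, _⟩
            · exact Or.inr ⟨y, by simp [h], hyj⟩
            · exact Or.inr ⟨u, by simp, (hconn_u_nbrs y hyn).trans hyj⟩
        · rintro (hvj | ⟨y, hy, hyj⟩)
          · exact Or.inl ((l2 j).mpr (Or.inl hvj))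
          · rcases List.mem_cons.mp hy with rfl | hyr
            · exact hescape j hyj
            · exact Or.inr ⟨y, (l3 y).mpr (Or.inl hyr), hyj⟩
      have hfpop_u_old : fpopP E (u :: rest) vis u := Or.inl (by simp)
      have hfpop_u_new : ¬ fpopP E s.2 s.1 u := by
        rintro (h | ⟨h, _⟩)
        · exact hus h
        · exact h hvsu
      have hfpop_iff : ∀ j, j ≠ u → (fpopP E (u :: rest) vis j ↔ fpopP E s.2 s.1 j) := by
        intro j hju
        constructor
        · rintro (hjq | ⟨hnv, y, hy, hyj⟩)
          · rcases List.mem_cons.mp hjq with rfl | hjr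
            · exact absurd rfl hju
            · exact Or.inl ((l3 j).mpr (Or.inl hjr))
          · by_cases hsj : visTrue s.1 j
            · rcases (l2 j).mp hsj with h | h
              · exact absurd h hnv
              · exact Or.inl ((l3 j).mpr (Or.inr ⟨h, hnv⟩))
            · rcases List.mem_cons.mp hy with rfl | hyr
              · rcases hescape j hyj with h | ⟨z, hz, hzj⟩
                · exact absurd h hsj
                · exact Or.inr ⟨hsj, z, hz, hzj⟩
              · exact Or.inr ⟨hsj, y, (l3 y).mpr (Or.inl hyr), hyj⟩
        · rintro (hjs | ⟨hns, y, hy, hyj⟩)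
          · rcases (l3 j).mp hjs with h | ⟨hjn, hnv⟩
            · exact Or.inl (by simp [h])
            · exact Or.inr ⟨hnv, u, by simp, hconn_u_nbrs j hjn⟩
          · have hnv : ¬ visTrue vis j := fun hc => hns ((l2 j).mpr (Or.inl hc))
            rcases (l3 y).mp hy with h | ⟨hyn, _⟩
            · exact Or.inr ⟨hnv, y, by simp [h], hyj⟩
            · exact Or.inr ⟨hnv, u, by simp, (hconn_u_nbrs y hyn).trans hyj⟩
      have hbool : ∀ j, j ≠ u →
          (@decide (fpopP E (u :: rest) vis j) (Classical.propDecidable _) : Bool) =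
            @decide (fpopP E s.2 s.1 j) (Classical.propDecidable _) :=
        fun j hju => decide_eq_decide.mpr (hfpop_iff j hju)
      have hboolu_old : (@decide (fpopP E (u :: rest) vis u) (Classical.propDecidable _) : Bool) = true :=
        @decide_eq_true _ (Classical.propDecidable _) hfpop_u_old
      have hboolu_new : (@decide (fpopP E s.2 s.1 u) (Classical.propDecidable _) : Bool) = false :=
        @decide_eq_false _ (Classical.propDecidable _) hfpop_u_new
      have hstep : solBFS adj deg nodes (u :: rest) vis c1 c2 =
          if PySem.Int.band (deg.getD u 0) 1 = PySem.Int.band (nodes.getD u 0) 1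
          then solBFS adj deg nodes s.2 s.1 (c1 + 1) c2
          else solBFS adj deg nodes s.2 s.1 c1 (c2 + 1) := by
        rw [solBFS]
      by_cases hmtch : PySem.Int.band (deg.getD u 0) 1 = PySem.Int.band (nodes.getD u 0) 1
      · have hmb : mtchB deg nodes u = true := decide_eq_true hmtch
        obtain ⟨g1, g2, g3, g4⟩ := ih s.2 s.1 (c1 + 1) c2 hmeas l1 l5 l4 hcl'
        rw [hstep, if_pos hmtch]
        refine ⟨g1, fun j => (g2 j).trans (hvis_iff j), ?_, ?_⟩
        · have hc1 : (List.range n).countP (fun j =>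
              @decide (fpopP E (u :: rest) vis j) (Classical.propDecidable _) && mtchB deg nodes j) =
              (List.range n).countP (fun j =>
                @decide (fpopP E s.2 s.1 j) (Classical.propDecidable _) && mtchB deg nodes j) + 1 :=
            countP_range_split n u _ _ hun (by simp [hboolu_old, hmb]) (by simp [hboolu_new])
              (fun j hju => by simp [hbool j hju])
          rw [g3, hc1]
          push_cast
          ring
        · have hc2 : (List.range n).countP (fun j =>
              @decide (fpopP E s.2 s.1 j) (Classical.propDecidable _) && !mtchB deg nodes j) =
              (List.range n).countP (fun j =>
                @decide (fpopP E (u :: rest) vis j) (Classical.propDecidable _) && !mtchB deg nodes j) :=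
            List.countP_congr (fun j _ => by
              by_cases hju : j = u
              · subst hju
                simp [hboolu_old, hboolu_new, hmb]
              · simp [hbool j hju])
          rw [g4, hc2]
      · have hmb : mtchB deg nodes u = false := decide_eq_false hmtch
        obtain ⟨g1, g2, g3, g4⟩ := ih s.2 s.1 c1 (c2 + 1) hmeas l1 l5 l4 hcl'
        rw [hstep, if_neg hmtch]
        refine ⟨g1, fun j => (g2 j).trans (hvis_iff j), ?_, ?_⟩
        · have hc1 : (List.range n).countP (fun j =>
              @decide (fpopP E s.2 s.1 j) (Classical.propDecidable _) && mtchB deg nodes j) =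
              (List.range n).countP (fun j =>
                @decide (fpopP E (u :: rest) vis j) (Classical.propDecidable _) && mtchB deg nodes j) :=
            List.countP_congr (fun j _ => by
              by_cases hju : j = u
              · subst hju
                simp [hboolu_old, hboolu_new, hmb]
              · simp [hbool j hju])
          rw [g3, hc1]
        · have hc2 : (List.range n).countP (fun j =>
              @decide (fpopP E (u :: rest) vis j) (Classical.propDecidable _) && !mtchB deg nodes j) =
              (List.range n).countP (fun j =>
                @decide (fpopP E s.2 s.1 j) (Classical.propDecidable _) && !mtchB deg nodes j) + 1 :=
            countP_range_split n u _ _ hun (by simp [hboolu_old, hmb]) (by simp [hboolu_new])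
              (fun j hju => by simp [hbool j hju])
          rw [g4, hc2]
          push_cast
          ring

-- ===== A-side: the outer loop over all start indices =====
def outStep (adj : List (List Nat)) (deg nodes : List Int) (st : List Bool × Int × Int) (i : Nat) :
    List Bool × Int × Int :=
  if st.1.getD i false then st
  else
    let r := solBFS adj deg nodes [i] (st.1.set i true) 0 0
    (r.1, st.2.1 + (if r.2.1 = 1 then 1 else 0), st.2.2 + (if r.2.2 = 1 then 1 else 0))

lemma bfsOuter_eq (adj : List (List Nat)) (deg nodes : List Int) (n : Nat) :
    bfsOuter adj deg nodes n =
      (List.range n).foldl (outStep adj deg nodes) (List.replicate n false, 0, 0) := rfl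

def firstP (E : List (Nat × Nat)) (i : Nat) : Prop := ∀ i', i' < i → ¬ connR E i' i

noncomputable def cnt1C (E : List (Nat × Nat)) (deg nodes : List Int) (n i : Nat) : Nat :=
  (List.range n).countP (fun j => @decide (connR E i j) (Classical.propDecidable _) && mtchB deg nodes j)

noncomputable def cnt2C (E : List (Nat × Nat)) (deg nodes : List Int) (n i : Nat) : Nat :=
  (List.range n).countP (fun j => @decide (connR E i j) (Classical.propDecidable _) && !mtchB deg nodes j)

lemma getD_replicate {α : Type} (n j : Nat) (a : α) : (List.replicate n a).getD j a = a := by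
  by_cases hj : j < n
  · rw [List.getD_eq_getElem _ _ (by simpa using hj)]
    simp
  · rw [List.getD_eq_default _ _ (by simpa using hj)]

lemma outer_spec (n : Nat) (E : List (Nat × Nat)) (adj : List (List Nat)) (deg nodes : List Int)
    (hE : ∀ p ∈ E, p.1 < n ∧ p.2 < n)
    (hadj : ∀ u w : Nat, w ∈ adj.getD u [] ↔ ((u, w) ∈ E ∨ (w, u) ∈ E)) :
    ∀ k, k ≤ n →
      ((List.range k).foldl (outStep adj deg nodes) (List.replicate n false, 0, 0)).1.length = n ∧
      (∀ j, visTrue ((List.range k).foldl (outStep adj deg nodes) (List.replicate n false, 0, 0)).1 j ↔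
        ∃ i, i < k ∧ connR E i j) ∧
      ((List.range k).foldl (outStep adj deg nodes) (List.replicate n false, 0, 0)).2.1 =
        ((List.range k).countP (fun i =>
          @decide (firstP E i) (Classical.propDecidable _) && (cnt1C E deg nodes n i == 1)) : Int) ∧
      ((List.range k).foldl (outStep adj deg nodes) (List.replicate n false, 0, 0)).2.2 =
        ((List.range k).countP (fun i =>
          @decide (firstP E i) (Classical.propDecidable _) && (cnt2C E deg nodes n i == 1)) : Int) := by
  intro k
  induction k with
  | zero =>
    intro _
    refine ⟨by simp, ?_, by simp, by simp⟩
    intro j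
    simp [visTrue, getD_replicate]
  | succ k ih =>
    intro hk1
    have hk : k ≤ n := by omega
    have hkn : k < n := by omega
    obtain ⟨l1, l2, l3, l4⟩ := ih hk
    set st := (List.range k).foldl (outStep adj deg nodes) (List.replicate n false, 0, 0) with hst
    rw [List.range_succ, List.foldl_append, List.foldl_cons, List.foldl_nil, ← hst]
    by_cases hvk : visTrue st.1 k
    · -- k already visited: its component was counted earlier
      have hvkb : st.1.getD k false = true := hvk
      rw [outStep, if_pos hvkb]
      obtain ⟨i0, hi0, hconn0⟩ := (l2 k).mp hvk
      have hnfirst : ¬ firstP E k := fun hf => hf i0 hi0 hconn0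
      have hterm : (@decide (firstP E k) (Classical.propDecidable _) &&
          (cnt1C E deg nodes n k == 1)) = false := by
        simp [@decide_eq_false _ (Classical.propDecidable _) hnfirst]
      have hterm2 : (@decide (firstP E k) (Classical.propDecidable _) &&
          (cnt2C E deg nodes n k == 1)) = false := by
        simp [@decide_eq_false _ (Classical.propDecidable _) hnfirst]
      refine ⟨l1, ?_, ?_, ?_⟩
      · intro j
        rw [l2 j]
        constructor
        · rintro ⟨i, hi, hc⟩; exact ⟨i, by omega, hc⟩
        · rintro ⟨i, hi, hc⟩
          by_cases hik : i = k
          · subst hik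
            exact ⟨i0, hi0, hconn0.trans hc⟩
          · exact ⟨i, by omega, hc⟩
      · rw [l3, List.countP_append, List.countP_cons, List.countP_nil, hterm]
        simp
      · rw [l4, List.countP_append, List.countP_cons, List.countP_nil, hterm2]
        simp
    · -- k unvisited: it is the first index of a fresh component; BFS counts it
      have hvkb : ¬ st.1.getD k false = true := hvk
      rw [outStep, if_neg hvkb]
      dsimp only
      have hnv : ¬ ∃ i, i < k ∧ connR E i k := fun hc => hvk ((l2 k).mpr hc)
      have hfirst : firstP E k := fun i' hi' hc => hnv ⟨i', hi', hc⟩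
      have hlen' : (st.1.set k true).length = n := by simp [l1]
      have hvset : ∀ j, visTrue (st.1.set k true) j ↔ visTrue st.1 j ∨ j = k :=
        visTrue_set (by omega)
      obtain ⟨g1, g2, g3, g4⟩ := bfs_master n E adj deg nodes hE hadj
        (2 * countFalse (st.1.set k true) + 1) [k] (st.1.set k true) 0 0
        (by simp) hlen'
        (by intro x hx
            simp at hx
            subst hx
            exact (hvset x).mpr (Or.inr rfl))
        (by simp)
        (by intro x hx hxq w hw
            rcases (hvset x).mp hx with hx' | rfl
            · obtain ⟨i, hi, hc⟩ := (l2 x).mp hx'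
              exact (hvset w).mpr (Or.inl ((l2 w).mpr ⟨i, hi, hc.tail hw⟩))
            · exact absurd (by simp : x ∈ [x]) hxq)
      set r := solBFS adj deg nodes [k] (st.1.set k true) 0 0 with hr
      -- the nodes this BFS pops are exactly the component of k
      have hfpop_iff : ∀ j, fpopP E [k] (st.1.set k true) j ↔ connR E k j := by
        intro j
        constructor
        · rintro (hj | ⟨_, y, hy, hyj⟩)
          · simp at hj; subst hj; exact Relation.ReflTransGen.refl
          · simp at hy; subst hy; exact hyj
        · intro hc
          by_cases hjk : j = k
          · subst hjk; exact Or.inl (by simp)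
          · refine Or.inr ⟨?_, k, by simp, hc⟩
            intro hvj
            rcases (hvset j).mp hvj with hvj' | rfl
            · obtain ⟨i, hi, hc'⟩ := (l2 j).mp hvj'
              exact hnv ⟨i, hi, hc'.trans (connR_symm hc)⟩
            · exact hjk rfl
      have hcnt1 : (List.range n).countP (fun j =>
          @decide (fpopP E [k] (st.1.set k true) j) (Classical.propDecidable _) &&
            mtchB deg nodes j) = cnt1C E deg nodes n k :=
        List.countP_congr (fun j _ => by
          rw [decide_eq_decide.mpr (hfpop_iff j)])
      have hcnt2 : (List.range n).countP (fun j =>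
          @decide (fpopP E [k] (st.1.set k true) j) (Classical.propDecidable _) &&
            !mtchB deg nodes j) = cnt2C E deg nodes n k :=
        List.countP_congr (fun j _ => by
          rw [decide_eq_decide.mpr (hfpop_iff j)])
      refine ⟨g1, ?_, ?_, ?_⟩
      · intro j
        rw [g2 j]
        constructor
        · rintro (hj | ⟨y, hy, hyj⟩)
          · rcases (hvset j).mp hj with hj' | rfl
            · obtain ⟨i, hi, hc⟩ := (l2 j).mp hj'
              exact ⟨i, by omega, hc⟩
            · exact ⟨j, by omega, Relation.ReflTransGen.refl⟩
          · simp at hy; subst hy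
            exact ⟨y, by omega, hyj⟩
        · rintro ⟨i, hi, hc⟩
          by_cases hik : i = k
          · subst hik
            exact Or.inr ⟨i, by simp, hc⟩
          · exact Or.inl ((hvset j).mpr (Or.inl ((l2 j).mpr ⟨i, by omega, hc⟩)))
      · rw [l3, g3, hcnt1, List.countP_append, List.countP_cons, List.countP_nil]
        have hfb : (@decide (firstP E k) (Classical.propDecidable _) : Bool) = true :=
          @decide_eq_true _ (Classical.propDecidable _) hfirst
        simp only [hfb, Bool.true_and]
        by_cases hone : cnt1C E deg nodes n k = 1
        · simp [hone]
        · have : ((cnt1C E deg nodes n k : Int) = 1) ↔ False := by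
            constructor
            · intro hc; exact hone (by exact_mod_cast hc)
            · exact False.elim
          simp [this, hone]
      · rw [l4, g4, hcnt2, List.countP_append, List.countP_cons, List.countP_nil]
        have hfb : (@decide (firstP E k) (Classical.propDecidable _) : Bool) = true :=
          @decide_eq_true _ (Classical.propDecidable _) hfirst
        simp only [hfb, Bool.true_and]
        by_cases hone : cnt2C E deg nodes n k = 1
        · simp [hone]
        · have : ((cnt2C E deg nodes n k : Int) = 1) ↔ False := by
            constructor
            · intro hc; exact hone (by exact_mod_cast hc)
            · exact False.elim
          simp [this, hone]

-- ===== B-side: the tally dicts =====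
lemma tally_getD (root : Nat → Nat) (bit : Nat → Int) :
    ∀ (l : List Nat) (d : PySem.Dict Nat Int) (r : Nat),
      (l.foldl (tallyStep root bit) d).getD r 0 =
        d.getD r 0 + ((l.filter (fun i => root i == r)).map bit).sum := by
  intro l
  induction l with
  | nil => intro d r; simp
  | cons i t ih =>
    intro d r
    rw [List.foldl_cons]
    rw [ih]
    show (PySem.Dict.insert d (root i) (d.getD (root i) 0 + bit i)).getD r 0 + _ = _
    rw [PySem.Dict.getD_insert]
    by_cases h : root i = r
    · have hb : (root i == r) = true := beq_iff_eq.mpr h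
      rw [if_pos h.symm]
      simp [List.filter_cons, hb]
      rw [h]
      ring
    · have hb : (root i == r) = false := beq_eq_false_iff_ne.mpr h
      rw [if_neg (fun hc => h hc.symm)]
      simp [List.filter_cons, hb]

lemma tally_keys (root : Nat → Nat) (bit : Nat → Int) (l : List Nat) :
    (l.foldl (tallyStep root bit) PySem.Dict.empty).keys = PySem.Set.ofList (l.map root) := by
  rw [show (tallyStep root bit) =
      (fun (d : PySem.Dict Nat Int) (x : Nat) => d.insert (root x) (d.getD (root x) 0 + bit x))
    from rfl]
  rw [PySem.Dict.keys_foldl_insert_key]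
  rw [PySem.Dict.keys_empty, PySem.Set.update_nil_left]

lemma tally_keys_nodup (root : Nat → Nat) (bit : Nat → Int) (l : List Nat) :
    (l.foldl (tallyStep root bit) PySem.Dict.empty).keys.Nodup := by
  rw [show (tallyStep root bit) =
      (fun (d : PySem.Dict Nat Int) (x : Nat) => d.insert (root x) (d.getD (root x) 0 + bit x))
    from rfl]
  exact PySem.Dict.nodup_keys_foldl_insert_key l root _ PySem.Dict.empty PySem.Dict.nodup_keys_empty

lemma values_eq_map_keys (d : PySem.Dict Nat Int) (hnd : d.keys.Nodup) :
    d.values = d.keys.map (fun k => d.getD k 0) := by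
  have h := PySem.Dict.items_eq_map_keys d hnd 0
  show d.items.map (·.2) = _
  rw [h, List.map_map]
  rfl

lemma countOnes_eq (vals : List Int) :
    countOnes vals = (vals.countP (fun v => decide (v = 1)) : Int) := by
  unfold countOnes
  rw [PySem.List.foldl_ite_add_one]
  simp

lemma countP_ofList_map (root : Nat → Nat) (p : Nat → Bool) :
    ∀ n : Nat, (PySem.Set.ofList ((List.range n).map root)).countP p =
      (List.range n).countP (fun i => decide (∀ i', i' < i → root i' ≠ root i) && p (root i)) := by
  intro n
  induction n with
  | zero => simp
  | succ n ih =>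
    rw [List.range_succ, List.map_append, List.map_cons, List.map_nil,
      PySem.Set.ofList_append_singleton, PySem.Set.add_eq_ite,
      List.countP_append, List.countP_cons, List.countP_nil]
    by_cases hmem : root n ∈ PySem.Set.ofList ((List.range n).map root)
    · rw [if_pos hmem, ih]
      have : ∃ i, i < n ∧ root i = root n := by
        rcases List.mem_map.mp ((PySem.Set.mem_ofList _ _).mp hmem) with ⟨i, hi, hroot⟩
        exact ⟨i, List.mem_range.mp hi, hroot⟩
      obtain ⟨i0, hi0, hr0⟩ := this
      have hfalse : (decide (∀ i', i' < n → root i' ≠ root n)) = false :=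
        decide_eq_false (fun hc => hc i0 hi0 hr0)
      simp [hfalse]
    · rw [if_neg hmem, List.countP_append, List.countP_cons, List.countP_nil, ih]
      have htrue : (decide (∀ i', i' < n → root i' ≠ root n)) = true := by
        apply decide_eq_true
        intro i' hi' hc
        exact hmem ((PySem.Set.mem_ofList _ _).mpr (List.mem_map.mpr ⟨i', List.mem_range.mpr hi', hc⟩))
      simp [htrue]

-- ===== VERDICT (by name: the statement is the Claim_ definition above) =====
theorem solution_spec : Claim_equal_solution := by
  intro nodes edges _ hpre
  unfold Spec_solution solution solution_alt
  dsimp only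
  rw [PySem.List.foldl_prod_mk (f := degStep (mkIdMap nodes)) (g := adjStep (mkIdMap nodes)),
    PySem.List.foldl_prod_mk (f := degStep (mkIdMap nodes)) (g := compStep (mkIdMap nodes))]
  dsimp only
  rw [bfsOuter_eq]
  set idMap := mkIdMap nodes with hidMap
  set n := nodes.length with hn
  set deg := edges.foldl (degStep idMap) (List.replicate n 0) with hdeg
  set adj := edges.foldl (adjStep idMap) (List.replicate n []) with hadj_def
  set comp := edges.foldl (compStep idMap) (List.range n) with hcomp_def
  set E := edges.map (edgeIdx idMap) with hE_def
  set rootF := fun i => comp.getD i 0 with hrootF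
  -- endpoint bounds from Pre_
  have hb : ∀ e ∈ edges, (edgeIdx idMap e).1 < n ∧ (edgeIdx idMap e).2 < n := by
    intro e he
    exact edgeIdx_lt nodes e (hpre e he).1 (hpre e he).2
  have hEb : ∀ p ∈ E, p.1 < n ∧ p.2 < n := by
    intro p hp
    rcases List.mem_map.mp hp with ⟨e, he, rfl⟩
    exact hb e he
  -- adjacency characterization
  have hadjmem : ∀ u w : Nat, w ∈ adj.getD u [] ↔ ((u, w) ∈ E ∨ (w, u) ∈ E) := by
    have := adj_inv n idMap edges (List.replicate n []) [] hb (by simp) (by simp)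
      (by intro u w
          constructor
          · intro hw
            rw [getD_replicate] at hw
            simp at hw
          · intro hw; simp at hw)
    intro u w
    rw [hadj_def, hE_def]
    simp only [List.mem_map, Prod.exists]
    simpa using this.2 u w
  -- component-label characterization
  have hroot : ∀ i j, i < n → j < n → (rootF i = rootF j ↔ connR E i j) := by
    have := comp_inv n idMap edges (List.range n) [] hb (by simp)
      (by intro i j hi hj
          rw [List.getD_eq_getElem _ _ (by simpa using hi),
            List.getD_eq_getElem _ _ (by simpa using hj)]
          simp [connR_nil])
    intro i j hi hj
    rw [hrootF]
    simpa using this.2 i j hi hj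
  -- outer BFS loop results
  obtain ⟨o1, o2, o3, o4⟩ := outer_spec n E adj deg nodes hEb hadjmem n le_rfl
  rw [o3, o4]
  -- B-side: split the two tally dicts
  set bit1 := fun i => if PySem.Int.band (deg.getD i 0) 1 = PySem.Int.band (nodes.getD i 0) 1
    then (1 : Int) else 0 with hbit1_def
  set bit2 := fun i => if PySem.Int.band (deg.getD i 0) 1 = PySem.Int.band (nodes.getD i 0) 1
    then (0 : Int) else 1 with hbit2_def
  set d1 := (List.range n).foldl (tallyStep rootF bit1) PySem.Dict.empty with hd1_def
  set d2 := (List.range n).foldl (tallyStep rootF bit2) PySem.Dict.empty with hd2_def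
  have hbit1 : bit1 = (fun j => if mtchB deg nodes j = true then (1 : Int) else 0) := by
    funext j
    by_cases h : PySem.Int.band (deg.getD j 0) 1 = PySem.Int.band (nodes.getD j 0) 1 <;>
      simp [hbit1_def, mtchB, h]
  have hbit2 : bit2 = (fun j => if (!mtchB deg nodes j) = true then (1 : Int) else 0) := by
    funext j
    by_cases h : PySem.Int.band (deg.getD j 0) 1 = PySem.Int.band (nodes.getD j 0) 1 <;>
      simp [hbit2_def, mtchB, h]
  have hd1getD : ∀ r, d1.getD r 0 =
      ((List.range n).countP (fun j => mtchB deg nodes j && (rootF j == r)) : Int) := by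
    intro r
    rw [hd1_def, tally_getD, PySem.Dict.getD_empty, hbit1,
      PySem.List.sum_map_ite_one_zero, List.countP_filter]
    simp
  have hd2getD : ∀ r, d2.getD r 0 =
      ((List.range n).countP (fun j => (!mtchB deg nodes j) && (rootF j == r)) : Int) := by
    intro r
    rw [hd2_def, tally_getD, PySem.Dict.getD_empty, hbit2,
      PySem.List.sum_map_ite_one_zero, List.countP_filter]
    simp
  have hcnt1 : ∀ i, i < n → (List.range n).countP (fun j => mtchB deg nodes j && (rootF j == rootF i)) =
      cnt1C E deg nodes n i := by
    intro i hi
    apply List.countP_congr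
    intro j hj
    have hjn : j < n := List.mem_range.mp hj
    rw [Bool.and_comm]
    congr 1
    by_cases h : rootF j = rootF i
    · have hc : connR E i j := connR_symm ((hroot j i hjn hi).mp h)
      simp [h, @decide_eq_true _ (Classical.propDecidable _) hc]
    · have hc : ¬ connR E i j := fun hc => h ((hroot j i hjn hi).mpr (connR_symm hc))
      simp [h, @decide_eq_false _ (Classical.propDecidable _) hc]
  have hcnt2 : ∀ i, i < n → (List.range n).countP (fun j => (!mtchB deg nodes j) && (rootF j == rootF i)) =
      cnt2C E deg nodes n i := by
    intro i hi
    apply List.countP_congr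
    intro j hj
    have hjn : j < n := List.mem_range.mp hj
    rw [Bool.and_comm]
    congr 1
    by_cases h : rootF j = rootF i
    · have hc : connR E i j := connR_symm ((hroot j i hjn hi).mp h)
      simp [h, @decide_eq_true _ (Classical.propDecidable _) hc]
    · have hc : ¬ connR E i j := fun hc => h ((hroot j i hjn hi).mpr (connR_symm hc))
      simp [h, @decide_eq_false _ (Classical.propDecidable _) hc]
  -- B-side output as a countP over the node indices
  have hB : ∀ (d : PySem.Dict Nat Int) (bit : Nat → Int),
      d = (List.range n).foldl (tallyStep rootF bit) PySem.Dict.empty →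
      countOnes d.values = ((List.range n).countP (fun i =>
        decide (∀ i', i' < i → rootF i' ≠ rootF i) && decide (d.getD (rootF i) 0 = 1)) : Int) := by
    intro d bit hd
    rw [countOnes_eq]
    congr 1
    rw [hd, values_eq_map_keys _ (tally_keys_nodup rootF bit _), List.countP_map]
    simp only [Function.comp_def]
    rw [tally_keys, countP_ofList_map]
  rw [PySem.List.foldl_prod_mk (f := tallyStep rootF bit1) (g := tallyStep rootF bit2)]
  dsimp only
  rw [← hd1_def, ← hd2_def]
  rw [hB d1 bit1 hd1_def, hB d2 bit2 hd2_def]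
  -- both sides are now countP over List.range n; compare pointwise
  have hpoint1 : ∀ i ∈ List.range n,
      (@decide (firstP E i) (Classical.propDecidable _) && (cnt1C E deg nodes n i == 1)) =
      (decide (∀ i', i' < i → rootF i' ≠ rootF i) && decide (d1.getD (rootF i) 0 = 1)) := by
    intro i hi
    have hin : i < n := List.mem_range.mp hi
    congr 1
    · rw [decide_eq_decide]
      unfold firstP
      constructor
      · intro hf i' hi' hc
        exact hf i' hi' ((hroot i' i (by omega) hin).mp hc)
      · intro hf i' hi' hc
        exact hf i' hi' ((hroot i' i (by omega) hin).mpr hc)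
    · rw [hd1getD (rootF i), hcnt1 i hin]
      by_cases h : cnt1C E deg nodes n i = 1 <;> simp [h]
  have hpoint2 : ∀ i ∈ List.range n,
      (@decide (firstP E i) (Classical.propDecidable _) && (cnt2C E deg nodes n i == 1)) =
      (decide (∀ i', i' < i → rootF i' ≠ rootF i) && decide (d2.getD (rootF i) 0 = 1)) := by
    intro i hi
    have hin : i < n := List.mem_range.mp hi
    congr 1
    · rw [decide_eq_decide]
      unfold firstP
      constructor
      · intro hf i' hi' hc
        exact hf i' hi' ((hroot i' i (by omega) hin).mp hc)
      · intro hf i' hi' hc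
        exact hf i' hi' ((hroot i' i (by omega) hin).mpr hc)
    · rw [hd2getD (rootF i), hcnt2 i hin]
      by_cases h : cnt2C E deg nodes n i = 1 <;> simp [h]
  have e1 : (List.range n).countP (fun i =>
      @decide (firstP E i) (Classical.propDecidable _) && (cnt1C E deg nodes n i == 1)) =
      (List.range n).countP (fun i =>
        decide (∀ i', i' < i → rootF i' ≠ rootF i) && decide (d1.getD (rootF i) 0 = 1)) :=
    List.countP_congr (fun i hi => by rw [hpoint1 i hi])
  have e2 : (List.range n).countP (fun i =>
      @decide (firstP E i) (Classical.propDecidable _) && (cnt2C E deg nodes n i == 1)) =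
      (List.range n).countP (fun i =>
        decide (∀ i', i' < i → rootF i' ≠ rootF i) && decide (d2.getD (rootF i) 0 = 1)) :=
    List.countP_congr (fun i hi => by rw [hpoint2 i hi])
  rw [e1, e2]
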